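-- pv_equiv track=rewrite | github.com/simon-perriard/3hyper_karger_stein | hyper_karger.py | contract_hyperedge
-- ===== SOURCE A (Python) =====
-- def replace_endpoints(hyperedge, e, history):
--
--     new_vertice = hyperedge[0]
--     new_edge = []
--     new_history = history
--
--     # replace the vertices contracted by the new one
--     for i in range(3):
--
--         elt = e[i]
--
--         if elt in hyperedge:
--             new_edge.append(new_vertice)
--
--             # transfer history to new node
--             if elt != new_vertice:
--                 for _, h in enumerate(new_history[elt-1]):
--                     new_history[new_vertice-1].append(h)
--
--                 new_history[elt-1] = []
--
--         else:
--             new_edge.append(elt)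
--
--
--     return new_edge, new_history
--
-- def contract_hyperedge(hyperedge, graph, n, history):
--     contracted_graph = []
--
--     ## If all the endpoints of the edge to are different, 2 will disappear into the one remaining
--     ## If only 2 different endpoints, 1 will disappear
--     new_n = n
--     new_history = [[i for i in group] for group in history]
--
--     if (hyperedge[0] != hyperedge[1]) and (hyperedge[1] != hyperedge[2]) and (hyperedge[0] != hyperedge[2]):
--         new_n -= 2
--     else:
--         new_n -= 1
--
--
--     for _, e in enumerate(graph):
--         contracted_edge, new_history = replace_endpoints(hyperedge, e, new_history)
--
--         if not (contracted_edge[0] == contracted_edge[1] == contracted_edge[2]): # ignore if it's a point (lööp)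
--             contracted_graph.append(contracted_edge)
--
--     return new_n, contracted_graph, new_history
-- ===== SOURCE B (Python) =====
-- def contract_hyperedge(hyperedge, graph, n, history):
--     hv = hyperedge[0]
--     new_n = n - 2 if len({hyperedge[0], hyperedge[1], hyperedge[2]}) == 3 else n - 1
--     hset = set(hyperedge)
--
--     # pass 1: contracted endpoints in first-appearance order
--     order = []
--     seen = set()
--     for e in graph:
--         for elt in e[:3]:
--             if elt in hset and elt != hv and elt not in seen:
--                 seen.add(elt)
--                 order.append(elt)
--
--     # merge their histories into hv's slot, in that order
--     new_history = [list(group) for group in history]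
--     for v in order:
--         new_history[hv - 1] = new_history[hv - 1] + new_history[v - 1]
--         new_history[v - 1] = []
--
--     # pass 2: relabel the edges, dropping edges collapsed to a point
--     contracted_graph = []
--     for e in graph:
--         ce = [hv if elt in hset else elt for elt in e[:3]]
--         if not (ce[0] == ce[1] == ce[2]):
--             contracted_graph.append(ce)
--
--     return new_n, contracted_graph, new_history
-- ===== Notes on version B (the rewrite author's own statement) =====
-- stated objective: alternative
-- what changed: A interleaves relabelling and history transfer in one loop over the edges (each endpoint triggering an element-by-element append); B decomposes it into three passes: collect the contracted endpoints in first-appearance order, merge each such vertex's history into hyperedge[0]'s slot once, then relabel the edges in a separate scan.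
import Mathlib
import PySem

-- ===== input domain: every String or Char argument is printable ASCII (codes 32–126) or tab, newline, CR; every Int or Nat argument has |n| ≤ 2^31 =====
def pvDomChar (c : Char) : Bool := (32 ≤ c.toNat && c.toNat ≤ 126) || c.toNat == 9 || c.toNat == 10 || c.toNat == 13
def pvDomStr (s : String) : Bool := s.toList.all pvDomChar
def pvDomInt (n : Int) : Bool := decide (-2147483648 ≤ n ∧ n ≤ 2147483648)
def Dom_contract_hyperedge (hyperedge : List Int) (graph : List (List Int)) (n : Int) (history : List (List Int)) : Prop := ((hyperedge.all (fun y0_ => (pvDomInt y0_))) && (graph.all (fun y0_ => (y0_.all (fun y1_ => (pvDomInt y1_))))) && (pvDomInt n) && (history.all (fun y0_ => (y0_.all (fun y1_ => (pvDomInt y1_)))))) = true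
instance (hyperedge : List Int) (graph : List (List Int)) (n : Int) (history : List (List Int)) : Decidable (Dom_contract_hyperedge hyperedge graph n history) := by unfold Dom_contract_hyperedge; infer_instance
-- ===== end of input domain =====

-- B replaces A's single interleaved loop (relabel + history transfer per endpoint) by three separate passes:
-- collect the contracted endpoints in first-appearance order, merge their histories once each, then relabel the edges.
-- Alternative decomposition, same asymptotic cost; return-value equivalence only (neither A nor B mutates its arguments).

-- ===== PORT A =====
def replace_endpoints (hyperedge : List Int) (e : List Int) (history : List (List Int)) : List Int × List (List Int) :=
  let new_vertice := PySem.List.pyGetD hyperedge 0 0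
  (PySem.List.pyRange 0 3 1).foldl
    (fun (st : List Int × List (List Int)) i =>
      let elt := PySem.List.pyGetD e i 0
      if elt ∈ hyperedge then
        let ne := st.1 ++ [new_vertice]
        if elt ≠ new_vertice then
          let nh1 := (PySem.List.enumerate (PySem.List.pyGetD st.2 (elt - 1) [])).foldl
            (fun nh p => PySem.List.pySetD nh (new_vertice - 1)
              (PySem.List.pyGetD nh (new_vertice - 1) [] ++ [p.2])) st.2
          (ne, PySem.List.pySetD nh1 (elt - 1) [])
        else (ne, st.2)
      else (st.1 ++ [elt], st.2))
    ([], history)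

def contract_hyperedge (hyperedge : List Int) (graph : List (List Int)) (n : Int) (history : List (List Int)) : Int × List (List Int) × List (List Int) :=
  let new_n := if PySem.List.pyGetD hyperedge 0 0 ≠ PySem.List.pyGetD hyperedge 1 0 ∧
                  PySem.List.pyGetD hyperedge 1 0 ≠ PySem.List.pyGetD hyperedge 2 0 ∧
                  PySem.List.pyGetD hyperedge 0 0 ≠ PySem.List.pyGetD hyperedge 2 0
               then n - 2 else n - 1
  let new_history := history.map (fun group => group.map (fun i => i))
  let st := graph.foldl
    (fun (st : List (List Int) × List (List Int)) e =>
      let r := replace_endpoints hyperedge e st.2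
      if ¬ (PySem.List.pyGetD r.1 0 0 = PySem.List.pyGetD r.1 1 0 ∧
            PySem.List.pyGetD r.1 1 0 = PySem.List.pyGetD r.1 2 0)
      then (st.1 ++ [r.1], r.2) else (st.1, r.2))
    ([], new_history)
  (new_n, st.1, st.2)

-- ===== PORT B =====
def contract_hyperedge_alt (hyperedge : List Int) (graph : List (List Int)) (n : Int) (history : List (List Int)) : Int × List (List Int) × List (List Int) :=
  let hv := PySem.List.pyGetD hyperedge 0 0
  let new_n := if PySem.Set.len (PySem.Set.ofList
        [PySem.List.pyGetD hyperedge 0 0, PySem.List.pyGetD hyperedge 1 0, PySem.List.pyGetD hyperedge 2 0]) = 3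
      then n - 2 else n - 1
  let hset := PySem.Set.ofList hyperedge
  let os := graph.foldl
    (fun (st : List Int × PySem.Set Int) e =>
      (PySem.List.slice e none (some 3)).foldl
        (fun (st : List Int × PySem.Set Int) elt =>
          if PySem.Set.contains hset elt ∧ elt ≠ hv ∧ ¬ PySem.Set.contains st.2 elt
          then (st.1 ++ [elt], PySem.Set.add st.2 elt)
          else st) st)
    ([], PySem.Set.empty)
  let new_history0 := history.map (fun group => group.map (fun i => i))
  let new_history := os.1.foldl
    (fun nh v =>
      PySem.List.pySetD
        (PySem.List.pySetD nh (hv - 1) (PySem.List.pyGetD nh (hv - 1) [] ++ PySem.List.pyGetD nh (v - 1) []))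
        (v - 1) []) new_history0
  let contracted_graph := graph.foldl
    (fun cg e =>
      let ce := (PySem.List.slice e none (some 3)).map
        (fun elt => if PySem.Set.contains hset elt then hv else elt)
      if ¬ (PySem.List.pyGetD ce 0 0 = PySem.List.pyGetD ce 1 0 ∧
            PySem.List.pyGetD ce 1 0 = PySem.List.pyGetD ce 2 0)
      then cg ++ [ce] else cg)
    []
  (new_n, contracted_graph, new_history)

-- ===== PRECONDITION & SPEC =====
-- pvSlot len i = the Nat position Python's xs[i] addresses for an in-range (possibly negative) Int index i
def pvSlot (len : Nat) (i : Int) : Nat := if 0 ≤ i then i.toNat else len - (-i).toNat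

-- Pre_ excludes inputs where the hyperedge or an edge has fewer than 3 entries, or a contracted endpoint's (or,
-- when a contraction fires, hyperedge[0]'s) history index is out of range (A raises IndexError there, and B raises
-- IndexError on the remaining such inputs where A's transfer loop happens to skip the hv-1 access because the
-- source history is empty), and inputs where a contracted endpoint's wrapped history slot coincides with
-- hyperedge[0]'s slot (there A appends to the very list it is iterating and loops forever whenever that slot is
-- nonempty when reached).
def Pre_contract_hyperedge (hyperedge : List Int) (graph : List (List Int)) (n : Int) (history : List (List Int)) : Prop :=
  3 ≤ hyperedge.length ∧
  (∀ e ∈ graph, 3 ≤ e.length) ∧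
  (∀ e ∈ graph, ∀ v ∈ e.take 3, v ∈ hyperedge → v ≠ PySem.List.pyGetD hyperedge 0 0 →
    PySem.Raise.InRange history.length (v - 1) ∧
    PySem.Raise.InRange history.length (PySem.List.pyGetD hyperedge 0 0 - 1) ∧
    pvSlot history.length (v - 1) ≠ pvSlot history.length (PySem.List.pyGetD hyperedge 0 0 - 1))

instance (hyperedge : List Int) (graph : List (List Int)) (n : Int) (history : List (List Int)) : Decidable (Pre_contract_hyperedge hyperedge graph n history) := by unfold Pre_contract_hyperedge; infer_instance

def pvWitness_contract_hyperedge : List Int × List (List Int) × Int × List (List Int) :=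
  ([1, 2, 3], [[1, 2, 4], [3, 4, 5]], 6, [[10], [20], [30], [40], [50]])

def Spec_contract_hyperedge (hyperedge : List Int) (graph : List (List Int)) (n : Int) (history : List (List Int)) (out : Int × List (List Int) × List (List Int)) : Prop := out = contract_hyperedge_alt hyperedge graph n history
instance (hyperedge : List Int) (graph : List (List Int)) (n : Int) (history : List (List Int)) (out : Int × List (List Int) × List (List Int)) : Decidable (Spec_contract_hyperedge hyperedge graph n history out) := by unfold Spec_contract_hyperedge; infer_instance

-- ===== CLAIM (what is proved, stated in full; the proofs are below) =====
def Claim_equal_contract_hyperedge : Prop := ∀ (hyperedge : List Int) (graph : List (List Int)) (n : Int) (history : List (List Int)), Dom_contract_hyperedge hyperedge graph n history → Pre_contract_hyperedge hyperedge graph n history → Spec_contract_hyperedge hyperedge graph n history (contract_hyperedge hyperedge graph n history)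

-- ===== LEMMAS AND PROOFS =====

lemma pvSlot_lt {len : Nat} {i : Int} (h : PySem.Raise.InRange len i) : pvSlot len i < len := by
  obtain ⟨h1, h2⟩ := h; unfold pvSlot; split <;> omega

lemma pySetD_slot {α : Type} (xs : List α) (i : Int) (v : α) (h : PySem.Raise.InRange xs.length i) :
    PySem.List.pySetD xs i v = xs.set (pvSlot xs.length i) v := by
  obtain ⟨h1, h2⟩ := h
  simp only [PySem.List.pySetD, PySem.List.pySet?, PySem.List.pyIdx?, pvSlot]
  split
  · rfl
  · rfl

lemma pyGetD_slot {α : Type} (xs : List α) (i : Int) (d : α) (h : PySem.Raise.InRange xs.length i) :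
    PySem.List.pyGetD xs i d = xs.getD (pvSlot xs.length i) d := by
  obtain ⟨h1, h2⟩ := h
  simp only [PySem.List.pyGetD, PySem.List.pyGet?, PySem.List.pyIdx?, pvSlot, List.getD]
  split
  · rfl
  · rfl

def pvT (hv : Int) (nh : List (List Int)) (v : Int) : List (List Int) :=
  PySem.List.pySetD
    (PySem.List.pySetD nh (hv - 1) (PySem.List.pyGetD nh (hv - 1) [] ++ PySem.List.pyGetD nh (v - 1) []))
    (v - 1) []

def pvStepA (hs : List Int) (hv : Int) (nh : List (List Int)) (v : Int) : List (List Int) :=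
  if v ∈ hs ∧ v ≠ hv then pvT hv nh v else nh

def pvGood (len : Nat) (hv v : Int) : Prop :=
  PySem.Raise.InRange len (v - 1) ∧ PySem.Raise.InRange len (hv - 1) ∧
  pvSlot len (v - 1) ≠ pvSlot len (hv - 1)

def pvBuild (hs : List Int) (hv : Int) (seen : PySem.Set Int) : List Int → List Int
  | [] => []
  | v :: rest =>
      if v ∈ hs ∧ v ≠ hv ∧ v ∉ seen then v :: pvBuild hs hv (PySem.Set.add seen v) rest
      else pvBuild hs hv seen rest

lemma getD_set_self' {α : Type} (xs : List α) (n : Nat) (v d : α) (h : n < xs.length) :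
    (xs.set n v).getD n d = v := by
  rw [List.getD_eq_getElem _ _ (by simpa using h)]
  exact List.getElem_set_self (by simpa using h)

lemma getD_set_ne' {α : Type} (xs : List α) (n m : Nat) (v d : α) (h : n ≠ m) :
    (xs.set n v).getD m d = xs.getD m d := by
  simp [List.getD, List.getElem?_set_ne h]

lemma set_getD_self' {α : Type} (xs : List α) (n : Nat) (d : α) (h : n < xs.length) :
    xs.set n (xs.getD n d) = xs := by
  rw [List.getD_eq_getElem _ _ h]; exact List.set_getElem_self h

lemma pvTransfer (hv : Int) (src : List Int) : ∀ (s : Int) (nh : List (List Int)),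
    PySem.Raise.InRange nh.length (hv - 1) →
    (PySem.List.enumerate src s).foldl
      (fun nh p => PySem.List.pySetD nh (hv - 1) (PySem.List.pyGetD nh (hv - 1) [] ++ [p.2])) nh
    = PySem.List.pySetD nh (hv - 1) (PySem.List.pyGetD nh (hv - 1) [] ++ src) := by
  induction src with
  | nil =>
    intro s nh h
    rw [PySem.List.enumerate_nil]
    simp only [List.foldl_nil, List.append_nil]
    rw [pySetD_slot _ _ _ h, pyGetD_slot _ _ _ h, set_getD_self' _ _ _ (pvSlot_lt h)]
  | cons x rest ih =>
    intro s nh h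
    rw [PySem.List.enumerate_cons, List.foldl_cons]
    have hlen : (PySem.List.pySetD nh (hv - 1) (PySem.List.pyGetD nh (hv - 1) [] ++ [x])).length = nh.length :=
      PySem.List.length_pySetD _ _ _
    rw [ih (s + 1) _ (by rw [hlen]; exact h)]
    rw [pySetD_slot _ _ _ h, pyGetD_slot _ _ _ h]
    have h' : PySem.Raise.InRange (nh.set (pvSlot nh.length (hv - 1)) (nh.getD (pvSlot nh.length (hv - 1)) [] ++ [x])).length (hv - 1) := by
      simpa using h
    rw [pySetD_slot _ _ _ h', pyGetD_slot _ _ _ h']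
    simp only [List.length_set]
    rw [getD_set_self' _ _ _ _ (pvSlot_lt h), List.set_set]
    simp only [List.append_assoc, List.singleton_append]
    rw [pySetD_slot _ _ _ h]

lemma pvT_noop (len : Nat) (hv v : Int) (nh : List (List Int)) (hlen : nh.length = len)
    (hg : pvGood len hv v) (hempty : nh.getD (pvSlot len (v - 1)) [] = []) :
    pvT hv nh v = nh := by
  obtain ⟨hv1, hh1, hne⟩ := hg
  have hvr : PySem.Raise.InRange nh.length (v - 1) := by rw [hlen]; exact hv1
  have hhr : PySem.Raise.InRange nh.length (hv - 1) := by rw [hlen]; exact hh1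
  unfold pvT
  rw [pyGetD_slot _ _ _ hhr, pyGetD_slot _ _ _ hvr, hlen, hempty, List.append_nil]
  have hinner : PySem.List.pySetD nh (hv - 1) (nh.getD (pvSlot len (hv - 1)) []) = nh := by
    rw [pySetD_slot nh _ _ hhr, hlen]
    exact set_getD_self' _ _ _ (by rw [hlen]; exact pvSlot_lt hh1)
  rw [hinner, pySetD_slot nh _ _ hvr, hlen]
  conv_lhs => rw [← hempty]
  exact set_getD_self' _ _ _ (by rw [hlen]; exact pvSlot_lt hv1)

lemma len_pvT (hv : Int) (nh : List (List Int)) (v : Int) : (pvT hv nh v).length = nh.length := by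
  simp [pvT, PySem.List.length_pySetD]

lemma pvBuild_cons (hs : List Int) (hv : Int) (seen : PySem.Set Int) (v : Int) (rest : List Int) :
    pvBuild hs hv seen (v :: rest) =
      if v ∈ hs ∧ v ≠ hv ∧ v ∉ seen then v :: pvBuild hs hv (PySem.Set.add seen v) rest
      else pvBuild hs hv seen rest := rfl

lemma pvMain (hs : List Int) (hv : Int) (len : Nat) : ∀ (S : List Int) (nh : List (List Int)) (seen : PySem.Set Int),
    nh.length = len →
    (∀ v ∈ S, v ∈ hs → v ≠ hv → pvGood len hv v) →
    (∀ v ∈ seen, pvGood len hv v ∧ nh.getD (pvSlot len (v - 1)) [] = []) →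
    S.foldl (pvStepA hs hv) nh = (pvBuild hs hv seen S).foldl (pvT hv) nh := by
  intro S
  induction S with
  | nil => intro nh seen _ _ _; rfl
  | cons v rest ih =>
    intro nh seen hlen hgood hseen
    rw [List.foldl_cons]
    by_cases hp : v ∈ hs ∧ v ≠ hv
    · have hgv : pvGood len hv v := hgood v (by simp) hp.1 hp.2
      by_cases hsv : v ∈ seen
      · have hnoop : pvT hv nh v = nh := pvT_noop len hv v nh hlen hgv (hseen v hsv).2
        rw [show pvStepA hs hv nh v = nh by rw [pvStepA, if_pos hp, hnoop]]
        rw [pvBuild_cons, if_neg (by tauto)]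
        exact ih nh seen hlen (fun w hw => hgood w (by simp [hw])) hseen
      · rw [show pvStepA hs hv nh v = pvT hv nh v by rw [pvStepA, if_pos hp]]
        rw [pvBuild_cons, if_pos ⟨hp.1, hp.2, hsv⟩]
        rw [List.foldl_cons]
        apply ih (pvT hv nh v) (PySem.Set.add seen v) (by rw [len_pvT, hlen])
          (fun w hw => hgood w (by simp [hw]))
        intro w hw
        rcases (PySem.Set.mem_add seen v w).1 hw with hws | hwv
        · obtain ⟨hgw, hew⟩ := hseen w hws
          refine ⟨hgw, ?_⟩
          -- T wrote at slot (hv-1) and slot (v-1); slot w ≠ slot hv, and slot v was set to []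
          have hvr : PySem.Raise.InRange nh.length (v - 1) := by rw [hlen]; exact hgv.1
          have hhr : PySem.Raise.InRange nh.length (hv - 1) := by rw [hlen]; exact hgv.2.1
          unfold pvT
          rw [pySetD_slot _ _ _ (by simpa [PySem.List.length_pySetD, hlen] using hgv.1),
              PySem.List.length_pySetD, hlen]
          by_cases hsame : pvSlot len (w - 1) = pvSlot len (v - 1)
          · rw [hsame]; exact getD_set_self' _ _ _ _ (by rw [PySem.List.length_pySetD, hlen]; exact pvSlot_lt hgv.1)
          · rw [getD_set_ne' _ _ _ _ _ (fun hh => hsame hh.symm)]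
            rw [pySetD_slot _ _ _ hhr, hlen]
            rw [getD_set_ne' _ _ _ _ _ (fun hh => hgw.2.2 hh.symm)]
            exact hew
        · subst hwv
          refine ⟨hgv, ?_⟩
          unfold pvT
          rw [pySetD_slot _ _ _ (by simpa [PySem.List.length_pySetD, hlen] using hgv.1),
              PySem.List.length_pySetD, hlen]
          exact getD_set_self' _ _ _ _ (by rw [PySem.List.length_pySetD, hlen]; exact pvSlot_lt hgv.1)
    · rw [show pvStepA hs hv nh v = nh by rw [pvStepA, if_neg hp]]
      rw [pvBuild_cons, if_neg (by tauto)]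
      exact ih nh seen hlen (fun w hw => hgood w (by simp [hw])) hseen

lemma pvPass1 (hs : List Int) (hv : Int) : ∀ (S : List Int) (order : List Int) (seen : PySem.Set Int),
    (S.foldl
      (fun (st : List Int × PySem.Set Int) elt =>
        if PySem.Set.contains (PySem.Set.ofList hs) elt ∧ elt ≠ hv ∧ ¬ PySem.Set.contains st.2 elt
        then (st.1 ++ [elt], PySem.Set.add st.2 elt)
        else st) (order, seen)).1
    = order ++ pvBuild hs hv seen S := by
  intro S
  induction S with
  | nil => intro order seen; simp [pvBuild]
  | cons v rest ih =>
    intro order seen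
    rw [List.foldl_cons]
    by_cases hc : v ∈ hs ∧ v ≠ hv ∧ v ∉ seen
    · rw [if_pos (by
        refine ⟨?_, hc.2.1, ?_⟩
        · rw [PySem.Set.contains_iff]; exact (PySem.Set.mem_ofList hs v).2 hc.1
        · rw [PySem.Set.contains_iff]; exact fun h => hc.2.2 h)]
      rw [pvBuild_cons, if_pos hc]
      rw [ih (order ++ [v]) (PySem.Set.add seen v)]
      simp
    · rw [if_neg (by
        rw [PySem.Set.contains_iff, PySem.Set.contains_iff, PySem.Set.mem_ofList]
        tauto)]
      rw [pvBuild_cons, if_neg hc]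
      exact ih order seen

lemma pvN (a b c : Int) :
    (PySem.Set.len (PySem.Set.ofList [a, b, c]) = 3) ↔ (a ≠ b ∧ b ≠ c ∧ a ≠ c) := by
  by_cases hab : a = b <;> by_cases hbc : b = c <;> by_cases hac : a = c <;>
    simp [PySem.Set.ofList, PySem.Set.add, PySem.Set.empty, PySem.Set.len, PySem.Set.contains,
      List.contains_eq_mem, hab, hbc, hac] <;> split_ifs <;> simp_all <;> omega

lemma len_pvStepA (hs : List Int) (hv : Int) (nh : List (List Int)) (v : Int) :
    (pvStepA hs hv nh v).length = nh.length := by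
  unfold pvStepA; split <;> simp [len_pvT]

lemma pvFold (hs : List Int) (hv : Int) : ∀ (xs : List Int) (acc : List Int) (nh : List (List Int)),
    (∀ v ∈ xs, v ∈ hs → v ≠ hv → PySem.Raise.InRange nh.length (hv - 1)) →
    xs.foldl
      (fun (st : List Int × List (List Int)) elt =>
        if elt ∈ hs then
          if elt ≠ hv then
            (st.1 ++ [hv],
              PySem.List.pySetD
                (List.foldl (fun nh p => PySem.List.pySetD nh (hv - 1)
                    (PySem.List.pyGetD nh (hv - 1) [] ++ [p.2])) st.2
                  (PySem.List.enumerate (PySem.List.pyGetD st.2 (elt - 1) [])))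
                (elt - 1) [])
          else (st.1 ++ [hv], st.2)
        else (st.1 ++ [elt], st.2)) (acc, nh)
    = (acc ++ xs.map (fun x => if x ∈ hs then hv else x), xs.foldl (pvStepA hs hv) nh) := by
  intro xs
  induction xs with
  | nil => intro acc nh _; simp
  | cons x rest ih =>
    intro acc nh hr
    simp only [List.foldl_cons, List.map_cons]
    by_cases hx : x ∈ hs
    · by_cases hne : x = hv
      · rw [if_pos hx, if_neg (not_not_intro hne)]
        subst hne
        rw [ih (acc ++ [x]) nh (fun w hw => hr w (by simp [hw]))]
        have h1 : pvStepA hs x nh x = nh := by rw [pvStepA]; simp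
        simp [hx, h1]
      · rw [if_pos hx, if_pos hne]
        rw [pvTransfer hv _ _ nh (hr x (by simp) hx hne)]
        have hstep : PySem.List.pySetD
            (PySem.List.pySetD nh (hv - 1) (PySem.List.pyGetD nh (hv - 1) [] ++ PySem.List.pyGetD nh (x - 1) []))
            (x - 1) [] = pvStepA hs hv nh x := by
          rw [pvStepA, if_pos ⟨hx, hne⟩]; rfl
        rw [hstep, ih (acc ++ [hv]) _ (fun w hw => by
          rw [len_pvStepA]; exact hr w (by simp [hw]))]
        simp [hx]
    · rw [if_neg hx]
      rw [ih (acc ++ [x]) nh (fun w hw => hr w (by simp [hw]))]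
      have h1 : pvStepA hs hv nh x = nh := by rw [pvStepA, if_neg (by tauto)]
      simp [hx, h1]

lemma pvRep (hs : List Int) (e : List Int) (nh : List (List Int)) (he : 3 ≤ e.length)
    (hr : ∀ v ∈ e.take 3, v ∈ hs → v ≠ PySem.List.pyGetD hs 0 0 →
      PySem.Raise.InRange nh.length (PySem.List.pyGetD hs 0 0 - 1)) :
    replace_endpoints hs e nh =
      ((e.take 3).map (fun x => if x ∈ hs then PySem.List.pyGetD hs 0 0 else x),
       (e.take 3).foldl (pvStepA hs (PySem.List.pyGetD hs 0 0)) nh) := by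
  obtain ⟨a, b, c, r, rfl⟩ : ∃ a b c r, e = a :: b :: c :: r := by
    match e, he with
    | a :: b :: c :: r, _ => exact ⟨a, b, c, r, rfl⟩
  have htake : (a :: b :: c :: r).take 3 = [a, b, c] := rfl
  rw [htake] at hr ⊢
  unfold replace_endpoints
  rw [show PySem.List.pyRange 0 3 1 = [0, 1, 2] from by decide]
  have hg0 : PySem.List.pyGetD (a :: b :: c :: r) (0 : Int) 0 = a := by
    rw [PySem.List.pyGetD_ofNat']; rfl
  have hg1 : PySem.List.pyGetD (a :: b :: c :: r) (1 : Int) 0 = b := by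
    rw [PySem.List.pyGetD_ofNat']; rfl
  have hg2 : PySem.List.pyGetD (a :: b :: c :: r) (2 : Int) 0 = c := by
    rw [PySem.List.pyGetD_ofNat']; rfl
  have := pvFold hs (PySem.List.pyGetD hs 0 0) [a, b, c] [] nh hr
  simp only [List.foldl_cons, List.foldl_nil, List.nil_append] at this ⊢
  rw [hg0, hg1, hg2]
  exact this

lemma len_foldl_stepA (hs : List Int) (hv : Int) : ∀ (xs : List Int) (nh : List (List Int)),
    (xs.foldl (pvStepA hs hv) nh).length = nh.length := by
  intro xs
  induction xs with
  | nil => intro nh; rfl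
  | cons x rest ih => intro nh; rw [List.foldl_cons, ih, len_pvStepA]

def pvCgStep (hs : List Int) (hv : Int) (cg : List (List Int)) (e : List Int) : List (List Int) :=
  let ce := (e.take 3).map (fun x => if x ∈ hs then hv else x)
  if ¬ (PySem.List.pyGetD ce 0 0 = PySem.List.pyGetD ce 1 0 ∧
        PySem.List.pyGetD ce 1 0 = PySem.List.pyGetD ce 2 0)
  then cg ++ [ce] else cg

lemma pvGraph (hs : List Int) (len : Nat) : ∀ (graph : List (List Int)) (cg : List (List Int)) (nh : List (List Int)),
    nh.length = len →
    (∀ e ∈ graph, 3 ≤ e.length) →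
    (∀ e ∈ graph, ∀ v ∈ e.take 3, v ∈ hs → v ≠ PySem.List.pyGetD hs 0 0 →
      PySem.Raise.InRange len (PySem.List.pyGetD hs 0 0 - 1)) →
    graph.foldl
      (fun (st : List (List Int) × List (List Int)) e =>
        if ¬ (PySem.List.pyGetD (replace_endpoints hs e st.2).1 0 0 = PySem.List.pyGetD (replace_endpoints hs e st.2).1 1 0 ∧
              PySem.List.pyGetD (replace_endpoints hs e st.2).1 1 0 = PySem.List.pyGetD (replace_endpoints hs e st.2).1 2 0)
        then (st.1 ++ [(replace_endpoints hs e st.2).1], (replace_endpoints hs e st.2).2)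
        else (st.1, (replace_endpoints hs e st.2).2)) (cg, nh)
    = (graph.foldl (pvCgStep hs (PySem.List.pyGetD hs 0 0)) cg,
       graph.foldl (fun nh e => (e.take 3).foldl (pvStepA hs (PySem.List.pyGetD hs 0 0)) nh) nh) := by
  intro graph
  induction graph with
  | nil => intro cg nh _ _ _; rfl
  | cons e rest ih =>
    intro cg nh hlen he hr
    simp only [List.foldl_cons]
    rw [pvRep hs e nh (he e (by simp)) (fun v hv1 hv2 hv3 => by
      rw [hlen]; exact hr e (by simp) v hv1 hv2 hv3)]
    have hlen' : ((e.take 3).foldl (pvStepA hs (PySem.List.pyGetD hs 0 0)) nh).length = len := by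
      rw [len_foldl_stepA]; exact hlen
    by_cases ht : ¬ (PySem.List.pyGetD ((e.take 3).map (fun x => if x ∈ hs then PySem.List.pyGetD hs 0 0 else x)) 0 0 =
          PySem.List.pyGetD ((e.take 3).map (fun x => if x ∈ hs then PySem.List.pyGetD hs 0 0 else x)) 1 0 ∧
        PySem.List.pyGetD ((e.take 3).map (fun x => if x ∈ hs then PySem.List.pyGetD hs 0 0 else x)) 1 0 =
          PySem.List.pyGetD ((e.take 3).map (fun x => if x ∈ hs then PySem.List.pyGetD hs 0 0 else x)) 2 0)
    · rw [if_pos ht, ih _ _ hlen' (fun e' h' => he e' (by simp [h'])) (fun e' h' => hr e' (by simp [h']))]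
      rw [pvCgStep, if_pos ht]
    · rw [if_neg ht, ih _ _ hlen' (fun e' h' => he e' (by simp [h'])) (fun e' h' => hr e' (by simp [h']))]
      rw [pvCgStep, if_neg ht]

-- ===== VERDICT (by name: the statement is the Claim_ definition above) =====
theorem contract_hyperedge_spec : Claim_equal_contract_hyperedge := by
  intro hyperedge graph n history _ hpre
  obtain ⟨h3, he, hgood⟩ := hpre
  unfold Spec_contract_hyperedge
  have hcopy : history.map (fun group => group.map (fun i => i)) = history := by
    simp [List.map_id']
  have hsl : ∀ (e : List Int), PySem.List.slice e none (some 3) = e.take 3 := fun e => by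
    have := PySem.List.slice_to (xs := e) (b := 3) (by norm_num); simpa using this
  have hfun : (fun elt => if PySem.Set.contains (PySem.Set.ofList hyperedge) elt
      then PySem.List.pyGetD hyperedge 0 0 else elt) = (fun x => if x ∈ hyperedge then PySem.List.pyGetD hyperedge 0 0 else x) := by
    funext x
    by_cases hx : x ∈ hyperedge
    · rw [if_pos ((PySem.Set.contains_iff _ _).2 ((PySem.Set.mem_ofList _ _).2 hx)), if_pos hx]
    · rw [if_neg (fun hc => hx ((PySem.Set.mem_ofList _ _).1 ((PySem.Set.contains_iff _ _).1 hc))), if_neg hx]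
  simp only [contract_hyperedge, contract_hyperedge_alt, hcopy, hsl, hfun]
  rw [pvGraph hyperedge history.length graph [] history rfl he
      (fun e hmem v h1 h2 h3 => (hgood e hmem v h1 h2 h3).2.1)]
  have hflatA : graph.foldl
      (fun nh e => (e.take 3).foldl (pvStepA hyperedge (PySem.List.pyGetD hyperedge 0 0)) nh) history
      = (graph.flatMap (fun e => e.take 3)).foldl (pvStepA hyperedge (PySem.List.pyGetD hyperedge 0 0)) history := by
    rw [List.foldl_flatMap]
  have hflatB : graph.foldl
      (fun (st : List Int × PySem.Set Int) e =>
        (e.take 3).foldl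
          (fun (st : List Int × PySem.Set Int) elt =>
            if PySem.Set.contains (PySem.Set.ofList hyperedge) elt ∧ elt ≠ PySem.List.pyGetD hyperedge 0 0 ∧
                ¬ PySem.Set.contains st.2 elt
            then (st.1 ++ [elt], PySem.Set.add st.2 elt)
            else st) st)
      ([], PySem.Set.empty)
      = (graph.flatMap (fun e => e.take 3)).foldl
          (fun (st : List Int × PySem.Set Int) elt =>
            if PySem.Set.contains (PySem.Set.ofList hyperedge) elt ∧ elt ≠ PySem.List.pyGetD hyperedge 0 0 ∧
                ¬ PySem.Set.contains st.2 elt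
            then (st.1 ++ [elt], PySem.Set.add st.2 elt)
            else st)
          ([], PySem.Set.empty) := by
    rw [List.foldl_flatMap]
  rw [hflatA, hflatB, pvPass1 hyperedge (PySem.List.pyGetD hyperedge 0 0) _ [] PySem.Set.empty]
  rw [pvMain hyperedge (PySem.List.pyGetD hyperedge 0 0) history.length _ history PySem.Set.empty rfl
      (fun v hv1 => by
        obtain ⟨e, hmem, hin⟩ := List.mem_flatMap.1 hv1
        exact fun h1 h2 => hgood e hmem v hin h1 h2)
      (fun v hv1 => absurd hv1 (List.not_mem_nil))]
  rw [show pvBuild hyperedge (PySem.List.pyGetD hyperedge 0 0) PySem.Set.empty (graph.flatMap fun e => e.take 3)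
        = [] ++ pvBuild hyperedge (PySem.List.pyGetD hyperedge 0 0) PySem.Set.empty (graph.flatMap fun e => e.take 3)
      from (List.nil_append _).symm]
  simp only [pvN, List.nil_append]
  rfl
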